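-- pv_equiv track=rewrite | github.com/maitreyasinha/SpOJ | CMPLS/main.py | recurse_diff
-- ===== SOURCE A (Python) =====
-- def recurse_diff(l1, new_elems_len, depthofrecursion):
--     if depthofrecursion == 1:
--         return [l1[0]]*(new_elems_len+1)
--     depthofrecursion -= 1
--     diff_list = recurse_diff(list(map(lambda a, b: a-b, l1[1:], l1[:-1])), new_elems_len, depthofrecursion)
--     for i in range(len(l1) - 1, len(diff_list)):
--         l1.append(l1[i] + diff_list[i])
--     return l1
-- ===== SOURCE B (Python) =====
-- def recurse_diff(l1, new_elems_len, depthofrecursion):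
--     if depthofrecursion == 1:
--         return [l1[0]] * (new_elems_len + 1)
--     # build the finite-difference table iteratively, top level first
--     levels = [l1]
--     for _ in range(depthofrecursion - 1):
--         cur = levels[-1]
--         levels.append([cur[i + 1] - cur[i] for i in range(len(cur) - 1)])
--     # the deepest level is constant: replace it by the extrapolated constant row
--     levels[-1] = [levels[-1][0]] * (new_elems_len + 1)
--     # propagate the extension back up, extending each level in place
--     for k in range(len(levels) - 2, -1, -1):
--         cur, child = levels[k], levels[k + 1]
--         for i in range(len(cur) - 1, len(child)):
--             cur.append(cur[i] + child[i])
--     return l1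
-- ===== Notes on version B (the rewrite author's own statement) =====
-- stated objective: alternative
-- what changed: Replaces A's recursion (re-slicing the list at each depth) by an explicit iteratively built finite-difference table: build all difference levels top-down in one loop, replace the deepest level by the extrapolated constant row, then extend each level bottom-up; same in-place extension of l1.
import Mathlib
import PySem

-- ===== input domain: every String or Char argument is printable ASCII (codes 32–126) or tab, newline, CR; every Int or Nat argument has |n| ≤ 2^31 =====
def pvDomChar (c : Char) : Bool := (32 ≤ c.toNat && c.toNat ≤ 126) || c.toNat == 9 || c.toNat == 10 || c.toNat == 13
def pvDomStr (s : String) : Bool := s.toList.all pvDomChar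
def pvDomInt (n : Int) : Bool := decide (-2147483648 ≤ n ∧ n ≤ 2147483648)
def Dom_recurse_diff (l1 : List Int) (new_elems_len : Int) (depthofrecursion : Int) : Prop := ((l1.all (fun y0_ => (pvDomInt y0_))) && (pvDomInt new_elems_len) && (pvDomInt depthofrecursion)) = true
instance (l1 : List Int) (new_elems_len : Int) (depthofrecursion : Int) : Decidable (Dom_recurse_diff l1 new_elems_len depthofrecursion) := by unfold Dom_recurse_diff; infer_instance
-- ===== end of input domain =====

-- B replaces A's recursion by an explicit difference table built iteratively and extended bottom-up
-- (objective: alternative decomposition, same cost). Both A and B extend the caller's list l1 in place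
-- for depthofrecursion > 1 (same observable mutation); the theorems below are about the return value.

-- ===== PORT A =====
-- '[l1[0]]*(new_elems_len+1)'; l1[0] raises IndexError on [] (excluded by Pre_), and a
-- non-positive multiplier yields [] exactly as '(ne+1).toNat' replicas do.
def pvBase (l : List Int) (ne : Int) : List Int :=
  match l with
  | [] => []
  | x :: _ => List.replicate (ne + 1).toNat x

-- the literal loop 'for i in range(len(cur)-1, len(child)): cur.append(cur[i]+child[i])'
-- (this loop appears verbatim in both Python versions; indices are in range under Pre_)
def pvExtend (cur child : List Int) : List Int :=
  (PySem.List.pyRange ((cur.length : Int) - 1) (child.length : Int) 1).foldl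
    (fun acc i => acc ++ [PySem.List.pyGetD acc i 0 + PySem.List.pyGetD child i 0]) cur

def recurse_diff (l1 : List Int) (new_elems_len : Int) (depthofrecursion : Int) : List Int :=
  if depthofrecursion = 1 then pvBase l1 new_elems_len
  else if depthofrecursion ≤ 1 then []  -- totality guard: Python recurses forever here (outside Pre_)
  else
    -- 'list(map(lambda a, b: a-b, l1[1:], l1[:-1]))': l1[1:] = drop 1, l1[:-1] = dropLast (exact)
    pvExtend l1 (recurse_diff (List.zipWith (fun a b => a - b) (l1.drop 1) l1.dropLast)
                   new_elems_len (depthofrecursion - 1))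
termination_by depthofrecursion.toNat
decreasing_by omega

-- ===== PORT B =====
-- '[cur[i+1] - cur[i] for i in range(len(cur)-1)]'
def pvDiffs (cur : List Int) : List Int :=
  (PySem.List.pyRange 0 ((cur.length : Int) - 1) 1).map
    (fun i => PySem.List.pyGetD cur (i + 1) 0 - PySem.List.pyGetD cur i 0)

-- the 'levels' list built by B's first loop (top level first)
def pvLevels (cur : List Int) : Nat → List (List Int)
  | 0 => [cur]
  | n + 1 => cur :: pvLevels (pvDiffs cur) n

def recurse_diff_alt (l1 : List Int) (new_elems_len : Int) (depthofrecursion : Int) : List Int :=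
  if depthofrecursion = 1 then pvBase l1 new_elems_len
  else
    let rev := (pvLevels l1 (depthofrecursion - 1).toNat).reverse
    let bottom := pvBase (rev.headD []) new_elems_len
    let rest := rev.drop 1
    if rest.isEmpty then l1  -- depth ≤ 0: B's backward loop runs zero steps, l1 returned unchanged
    else rest.foldl (fun child cur => pvExtend cur child) bottom

-- ===== PRECONDITION & SPEC =====
-- Pre_ excludes exactly where Python A raises: depth ≤ 0 recurses forever (RecursionError) and
-- len(l1) < depth empties a difference level, so the base case's l1[0] raises IndexError.
def Pre_recurse_diff (l1 : List Int) (new_elems_len : Int) (depthofrecursion : Int) : Prop :=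
  1 ≤ depthofrecursion ∧ depthofrecursion ≤ (l1.length : Int)
instance (l1 : List Int) (new_elems_len : Int) (depthofrecursion : Int) : Decidable (Pre_recurse_diff l1 new_elems_len depthofrecursion) := by unfold Pre_recurse_diff; infer_instance
def pvWitness_recurse_diff : List Int × Int × Int := ([1, 3, 7, 13], 3, 3)

def Spec_recurse_diff (l1 : List Int) (new_elems_len : Int) (depthofrecursion : Int) (out : List Int) : Prop := out = recurse_diff_alt l1 new_elems_len depthofrecursion
instance (l1 : List Int) (new_elems_len : Int) (depthofrecursion : Int) (out : List Int) : Decidable (Spec_recurse_diff l1 new_elems_len depthofrecursion out) := by unfold Spec_recurse_diff; infer_instance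

-- ===== CLAIM (what is proved, stated in full; the proofs are below) =====
def Claim_equal_recurse_diff : Prop := ∀ (l1 : List Int) (new_elems_len : Int) (depthofrecursion : Int), Dom_recurse_diff l1 new_elems_len depthofrecursion → Pre_recurse_diff l1 new_elems_len depthofrecursion → Spec_recurse_diff l1 new_elems_len depthofrecursion (recurse_diff l1 new_elems_len depthofrecursion)

-- ===== LEMMAS AND PROOFS =====

-- B's comprehension computes the same difference list as A's two-slice map.
lemma pvDiffs_eq (l : List Int) :
    pvDiffs l = List.zipWith (fun a b => a - b) (l.drop 1) l.dropLast := by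
  unfold pvDiffs
  apply List.ext_getElem
  · simp [PySem.List.length_pyRange_one]
  · intro i h1 h2
    simp [PySem.List.pyRange_one] at h1 ⊢
    have hidx : ((i : Int) + 1) = ((i + 1 : Nat) : Int) := by push_cast; ring
    rw [hidx, PySem.List.pyGetD_natCast]
    simp [List.getD, List.getElem?_eq_getElem (by omega : i + 1 < l.length),
      List.getElem?_eq_getElem (by omega : i < l.length)]

lemma pvLevels_length (c : List Int) (n : Nat) : (pvLevels c n).length = n + 1 := by
  induction n generalizing c with
  | zero => simp [pvLevels]
  | succ k ih => simp [pvLevels, ih]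

-- one unfolding of B: for depth ≥ 2, B is pvExtend of B at the next difference level
lemma alt_unfold (l1 : List Int) (ne d : Int) (h : 2 ≤ d) :
    recurse_diff_alt l1 ne d = pvExtend l1 (recurse_diff_alt (pvDiffs l1) ne (d - 1)) := by
  have hk : (d - 1).toNat = (d - 2).toNat + 1 := by omega
  obtain ⟨r0, R', hR⟩ : ∃ a t, (pvLevels (pvDiffs l1) ((d-2).toNat)).reverse = a :: t := by
    cases hrev : (pvLevels (pvDiffs l1) ((d-2).toNat)).reverse with
    | nil =>
        exfalso
        have hlen := pvLevels_length (pvDiffs l1) ((d-2).toNat)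
        rw [List.reverse_eq_nil_iff] at hrev
        simp [hrev] at hlen
    | cons a t => exact ⟨a, t, rfl⟩
  have hlhs : recurse_diff_alt l1 ne d =
      pvExtend l1 (R'.foldl (fun child cur => pvExtend cur child) (pvBase r0 ne)) := by
    simp only [recurse_diff_alt, if_neg (show ¬ d = 1 by omega), hk, pvLevels,
      List.reverse_cons, hR]
    simp [List.foldl_append]
  rw [hlhs]
  congr 1
  by_cases hk0 : (d - 2).toNat = 0
  · have hd2 : d = 2 := by omega
    rw [hk0] at hR
    simp only [pvLevels, List.reverse_cons, List.reverse_nil, List.nil_append] at hR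
    injection hR with h1 h2
    subst h1; subst h2
    simp [recurse_diff_alt, hd2]
  · have hd3 : 3 ≤ d := by omega
    have hlen := pvLevels_length (pvDiffs l1) ((d-2).toNat)
    have hlenR : R'.length = (d-2).toNat := by
      have := congrArg List.length hR
      simp at this
      omega
    have hne : R'.isEmpty = false := by
      rw [List.isEmpty_eq_false_iff]
      intro hcon; rw [hcon] at hlenR; simp at hlenR; omega
    simp only [recurse_diff_alt, if_neg (show ¬ d - 1 = 1 by omega),
      show d - 1 - 1 = d - 2 by ring, hR]
    simp [hne]

lemma key (n : Nat) : ∀ (l1 : List Int) (ne d : Int), 1 ≤ d → d ≤ (n : Int) →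
    recurse_diff l1 ne d = recurse_diff_alt l1 ne d := by
  induction n with
  | zero => intro l1 ne d h1 h2; omega
  | succ k ih =>
    intro l1 ne d h1 h2
    by_cases hd : d = 1
    · subst hd
      rw [recurse_diff, recurse_diff_alt]
      simp
    · have h2d : 2 ≤ d := by omega
      rw [recurse_diff, if_neg hd, if_neg (by omega), ← pvDiffs_eq,
        ih _ ne (d - 1) (by omega) (by push_cast at h2 ⊢; omega),
        alt_unfold l1 ne d h2d]

-- ===== VERDICT (by name: the statement is the Claim_ definition above) =====
theorem recurse_diff_spec : Claim_equal_recurse_diff := by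
  intro l1 ne d _ hPre
  unfold Spec_recurse_diff
  have h1 := hPre.1
  exact key d.toNat l1 ne d h1 (by omega)
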